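-- pv_equiv track=rewrite | github.com/csturja13/Diamond-Dash | diamond_catcher_DIY.py | to_zone_prev
-- ===== SOURCE A (Python) =====
-- def to_zone_prev(li, zn):
--     li1 = []
--
--     if zn == 0:
--         return li
--     elif zn == 1:
--         for p in li:
--             li1.append((p[1],p[0]))
--     elif zn == 2:
--         for p in li:
--             li1.append((-p[1],p[0]))
--     elif zn == 3:
--         for p in li:
--             li1.append((-p[0],p[1]))
--     elif zn == 4:
--         for p in li:
--             li1.append((-p[0],-p[1]))
--     elif zn == 5:
--         for p in li:
--             li1.append((-p[1],-p[0]))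
--     elif zn == 6:
--         for p in li:
--             li1.append((p[1],-p[0]))
--     elif zn == 7:
--         for p in li:
--             li1.append((p[0],-p[1]))
--
--     return li1
-- ===== SOURCE B (Python) =====
-- # Dihedral-group decomposition: zone zn = (zn//2) quarter-turn rotations after an
-- # optional coordinate swap (zn odd), applied as staged passes instead of 8 branch loops.
-- def to_zone_prev(li, zn):
--     if zn == 0:
--         return li
--     if not 1 <= zn <= 7:
--         return []
--     out = [(p[1], p[0]) for p in li] if zn % 2 else list(li)
--     for _ in range(zn // 2):
--         out = [(-y, x) for (x, y) in out]
--     return out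
-- ===== Notes on version B (the rewrite author's own statement) =====
-- stated objective: alternative
-- what changed: Replaced the eight per-zone branch loops by a dihedral-group decomposition: an optional swap pass for odd zn followed by zn//2 quarter-turn rotation passes, composed iteratively.
import Mathlib
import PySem

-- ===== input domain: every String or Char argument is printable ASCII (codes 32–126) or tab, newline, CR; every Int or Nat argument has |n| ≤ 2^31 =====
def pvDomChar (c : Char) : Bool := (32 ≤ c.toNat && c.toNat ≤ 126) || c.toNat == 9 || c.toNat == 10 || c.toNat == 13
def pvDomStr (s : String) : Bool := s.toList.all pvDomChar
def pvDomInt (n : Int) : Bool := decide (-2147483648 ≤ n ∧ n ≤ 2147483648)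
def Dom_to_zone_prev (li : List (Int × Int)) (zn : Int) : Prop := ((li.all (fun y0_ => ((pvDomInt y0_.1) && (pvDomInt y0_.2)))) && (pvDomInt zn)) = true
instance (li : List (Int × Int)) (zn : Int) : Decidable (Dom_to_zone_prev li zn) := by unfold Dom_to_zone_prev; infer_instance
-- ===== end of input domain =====

-- B replaces A's eight per-zone branch loops by a dihedral-group decomposition (optional swap pass, then zn//2 quarter-turn rotation passes); objective: alternative.


-- ===== PORT A =====
def to_zone_prev (li : List (Int × Int)) (zn : Int) : List (Int × Int) :=
  -- li1 = []; eight elif branches each appending to li1; return li1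
  if zn = 0 then li
  else if zn = 1 then li.foldl (fun li1 p => li1 ++ [(p.2, p.1)]) []
  else if zn = 2 then li.foldl (fun li1 p => li1 ++ [(-p.2, p.1)]) []
  else if zn = 3 then li.foldl (fun li1 p => li1 ++ [(-p.1, p.2)]) []
  else if zn = 4 then li.foldl (fun li1 p => li1 ++ [(-p.1, -p.2)]) []
  else if zn = 5 then li.foldl (fun li1 p => li1 ++ [(-p.2, -p.1)]) []
  else if zn = 6 then li.foldl (fun li1 p => li1 ++ [(p.2, -p.1)]) []
  else if zn = 7 then li.foldl (fun li1 p => li1 ++ [(p.1, -p.2)]) []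
  else []

-- ===== PORT B =====
-- one quarter-turn rotation pass: [(-y, x) for (x, y) in out]
def pvQuarterTurn (out : List (Int × Int)) : List (Int × Int) :=
  out.map (fun p => (-p.2, p.1))

def to_zone_prev_alt (li : List (Int × Int)) (zn : Int) : List (Int × Int) :=
  if zn = 0 then li
  else if ¬ (1 ≤ zn ∧ zn ≤ 7) then []
  else
    let out := if zn % 2 ≠ 0 then li.map (fun p => (p.2, p.1)) else li
    (PySem.List.pyRange 0 (PySem.Int.floordiv zn 2) 1).foldl (fun o _ => pvQuarterTurn o) out

-- ===== PRECONDITION & SPEC =====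
def Spec_to_zone_prev (li : List (Int × Int)) (zn : Int) (out : List (Int × Int)) : Prop := out = to_zone_prev_alt li zn
instance (li : List (Int × Int)) (zn : Int) (out : List (Int × Int)) : Decidable (Spec_to_zone_prev li zn out) := by unfold Spec_to_zone_prev; infer_instance

-- ===== CLAIM (what is proved, stated in full; the proofs are below) =====
def Claim_equal_to_zone_prev : Prop := ∀ (li : List (Int × Int)) (zn : Int), Dom_to_zone_prev li zn → Spec_to_zone_prev li zn (to_zone_prev li zn)

-- ===== LEMMAS AND PROOFS =====
-- a foldl that appends one image per element is a map
theorem foldl_append_map {α β : Type} (f : α → β) (li : List α) (acc : List β) :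
    li.foldl (fun li1 p => li1 ++ [f p]) acc = acc ++ li.map f := by
  induction li generalizing acc with
  | nil => simp
  | cons x xs ih => simp [List.foldl, ih]

theorem flatten_singleton_map {α β : Type} (f : α → β) (li : List α) :
    (li.map (fun x => [f x])).flatten = li.map f := by
  induction li with
  | nil => rfl
  | cons x xs ih => simp [ih]

-- ===== VERDICT (by name: the statement is the Claim_ definition above) =====
theorem to_zone_prev_spec : Claim_equal_to_zone_prev := by
  intro li zn _
  unfold Spec_to_zone_prev to_zone_prev to_zone_prev_alt
  by_cases h0 : zn = 0
  · simp [h0]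
  have hzn : ¬ (1 ≤ zn ∧ zn ≤ 7) ∨ zn = 1 ∨ zn = 2 ∨ zn = 3 ∨ zn = 4 ∨ zn = 5 ∨
      zn = 6 ∨ zn = 7 := by omega
  rcases hzn with h | h | h | h | h | h | h | h
  case _ =>
    have h1 : zn ≠ 1 := by omega
    have h2 : zn ≠ 2 := by omega
    have h3 : zn ≠ 3 := by omega
    have h4 : zn ≠ 4 := by omega
    have h5 : zn ≠ 5 := by omega
    have h6 : zn ≠ 6 := by omega
    have h7 : zn ≠ 7 := by omega
    simp [h0, h1, h2, h3, h4, h5, h6, h7, h]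
  all_goals
    simp [h, h0, foldl_append_map, flatten_singleton_map, Function.comp, pvQuarterTurn,
      show PySem.List.pyRange 0 0 1 = [] from by decide,
      show PySem.List.pyRange 0 1 1 = [0] from by decide,
      show PySem.List.pyRange 0 2 1 = [0, 1] from by decide,
      show PySem.List.pyRange 0 3 1 = [0, 1, 2] from by decide,
      PySem.Int.floordiv]
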